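-- pv_equiv track=rewrite | github.com/jwayj/CheckViolence | flask_py_code/py_02_no_message_eda.py | dd_count
-- ===== SOURCE A (Python) =====
-- def dd_count(df_dd):
--     dict_ = {
--         '1일' : 0 ,'2일' : 0 ,'3일' : 0 ,'4일' : 0 ,'5일' : 0 ,'6일' : 0 ,'7일' : 0 ,'8일' : 0 ,'9일' : 0 ,
--         '10일' : 0 ,'11일' : 0 ,'12일' : 0 ,'13일' : 0 ,'14일' : 0 ,'15일' : 0 ,'16일' : 0 ,'17일' : 0 ,'18일' : 0 ,'19일' : 0 ,
--         '20일' : 0 ,'21일' : 0 ,'22일' : 0 ,'23일' : 0 ,'24일' : 0 ,'25일' : 0 ,'26일' : 0 ,'27일' : 0 ,'28일' : 0 ,'29일' : 0 ,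
--         '30일' : 0 ,'31일' : 0 ,'32일' : 0 ,
--     }
--     for index,value in df_dd:
--         if str(int(index))+'일' in dict_.keys():
--             dict_[str(int(index))+'일'] = value
--
--     return dict_
-- ===== SOURCE B (Python) =====
-- def last_or_zero(pairs, key):
--     val = 0
--     for k, v in pairs:
--         if k == key:
--             val = v
--     return val
--
--
-- def dd_count(df_dd):
--     keyed = [(str(int(index)) + '일', value) for index, value in df_dd]
--     return {str(d) + '일': last_or_zero(keyed, str(d) + '일') for d in range(1, 33)}
-- ===== Notes on version B (the rewrite author's own statement) =====
-- stated objective: alternative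
-- what changed: Dropped the mutable 33-key dict entirely: B keys the input once, then for each template day 1..32 does a direct last-match scan of the keyed list (nested scans, no dict state), instead of A's membership-guarded in-place dict updates.
import Mathlib
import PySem

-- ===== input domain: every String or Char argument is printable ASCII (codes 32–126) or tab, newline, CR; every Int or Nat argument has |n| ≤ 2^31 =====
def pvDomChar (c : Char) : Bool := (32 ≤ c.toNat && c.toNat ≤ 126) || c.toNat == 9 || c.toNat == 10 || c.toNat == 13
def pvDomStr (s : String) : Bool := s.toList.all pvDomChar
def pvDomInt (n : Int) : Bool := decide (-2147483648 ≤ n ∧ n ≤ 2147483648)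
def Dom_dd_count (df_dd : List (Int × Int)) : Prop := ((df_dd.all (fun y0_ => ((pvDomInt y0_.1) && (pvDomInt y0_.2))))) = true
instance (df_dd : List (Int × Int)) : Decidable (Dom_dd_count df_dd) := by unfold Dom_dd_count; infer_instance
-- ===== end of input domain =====

-- B drops A's mutable 33-key dict: it keys the input once, then for each template day 1..32
-- scans the keyed list for the last match (default 0) — a different decomposition, same result.

-- ===== PORT A =====
-- the literal dict_ template of A: keys '1일'..'32일', all 0
def ddTemplate : PySem.Dict String Int :=
  PySem.Dict.ofList [("1일", 0), ("2일", 0), ("3일", 0), ("4일", 0), ("5일", 0), ("6일", 0),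
    ("7일", 0), ("8일", 0), ("9일", 0), ("10일", 0), ("11일", 0), ("12일", 0), ("13일", 0),
    ("14일", 0), ("15일", 0), ("16일", 0), ("17일", 0), ("18일", 0), ("19일", 0), ("20일", 0),
    ("21일", 0), ("22일", 0), ("23일", 0), ("24일", 0), ("25일", 0), ("26일", 0), ("27일", 0),
    ("28일", 0), ("29일", 0), ("30일", 0), ("31일", 0), ("32일", 0)]

def dd_count (df_dd : List (Int × Int)) : List (String × Int) :=
  (df_dd.foldl (fun d p =>
      let k := PySem.Int.toStr p.1 ++ "일"
      if d.keys.contains k then d.insert k p.2 else d) ddTemplate).items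

-- ===== PORT B =====
def last_or_zero (pairs : List (String × Int)) (key : String) : Int :=
  pairs.foldl (fun val kv => if kv.1 == key then kv.2 else val) 0

def dd_count_alt (df_dd : List (Int × Int)) : List (String × Int) :=
  let keyed := df_dd.map (fun p => (PySem.Int.toStr p.1 ++ "일", p.2))
  (PySem.List.pyRange 1 33 1).map
    (fun d => (PySem.Int.toStr d ++ "일", last_or_zero keyed (PySem.Int.toStr d ++ "일")))

-- ===== PRECONDITION & SPEC =====
def Spec_dd_count (df_dd : List (Int × Int)) (out : List (String × Int)) : Prop := out = dd_count_alt df_dd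
instance (df_dd : List (Int × Int)) (out : List (String × Int)) : Decidable (Spec_dd_count df_dd out) := by unfold Spec_dd_count; infer_instance

-- ===== CLAIM (what is proved, stated in full; the proofs are below) =====
def Claim_equal_dd_count : Prop := ∀ (df_dd : List (Int × Int)), Dom_dd_count df_dd → Spec_dd_count df_dd (dd_count df_dd)

-- ===== LEMMAS AND PROOFS =====

-- B's read pass, rendered against a prefix of already-seen keyed entries
def ddScan (pref : List (String × Int)) : List (String × Int) :=
  (PySem.List.pyRange 1 33 1).map
    (fun d => (PySem.Int.toStr d ++ "일", last_or_zero pref (PySem.Int.toStr d ++ "일")))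

theorem ddTemplate_eq_scan_nil : ddTemplate = PySem.Dict.mk (ddScan []) := by
  decide

-- last_or_zero after appending one pair
theorem last_or_zero_snoc (pref : List (String × Int)) (k key : String) (v : Int) :
    last_or_zero (pref ++ [(k, v)]) key
      = if k == key then v else last_or_zero pref key := by
  unfold last_or_zero
  rw [List.foldl_append]
  rfl

-- one step of A's loop preserves the invariant D = mk (ddScan pref)
theorem dd_step (pref : List (String × Int)) (k : String) (v : Int) :
    (if (PySem.Dict.mk (ddScan pref)).keys.contains k
      then (PySem.Dict.mk (ddScan pref)).insert k v
      else PySem.Dict.mk (ddScan pref)) = PySem.Dict.mk (ddScan (pref ++ [(k, v)])) := by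
  have hkeys : (PySem.Dict.mk (ddScan pref)).keys
      = (PySem.List.pyRange 1 33 1).map (fun d => PySem.Int.toStr d ++ "일") := by
    simp [PySem.Dict.keys, ddScan, List.map_map, Function.comp]
  by_cases hk : k ∈ (PySem.List.pyRange 1 33 1).map (fun d => PySem.Int.toStr d ++ "일")
  · have hc : (PySem.Dict.mk (ddScan pref)).keys.contains k = true := by
      rw [hkeys, List.contains_eq_mem]; exact decide_eq_true hk
    have hcd : (PySem.Dict.mk (ddScan pref)).contains k = true := by
      have := PySem.Dict.contains_iff_mem_keys (d := PySem.Dict.mk (ddScan pref)) (k := k)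
      rw [this, hkeys]; exact hk
    rw [if_pos hc]
    apply PySem.Dict.ext
    rw [PySem.Dict.items_insert_of_contains _ _ hcd]
    show (ddScan pref).map _ = ddScan (pref ++ [(k, v)])
    simp only [ddScan, List.map_map]
    apply List.map_congr_left
    intro d _
    simp only [Function.comp]
    rw [last_or_zero_snoc]
    by_cases h : PySem.Int.toStr d ++ "일" = k
    · simp [h]
    · have h1 : (PySem.Int.toStr d ++ "일" == k) = false := by simp [h]
      have h2 : (k == PySem.Int.toStr d ++ "일") = false := by
        simp only [beq_eq_false_iff_ne]; exact Ne.symm h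
      simp [h1, h2]
  · have hc : (PySem.Dict.mk (ddScan pref)).keys.contains k = false := by
      rw [hkeys, List.contains_eq_mem]; exact decide_eq_false hk
    simp only [hc, Bool.false_eq_true, if_false]
    congr 1
    unfold ddScan
    apply List.map_congr_left
    intro d hd
    have hne : k ≠ PySem.Int.toStr d ++ "일" := by
      intro h; exact hk (h ▸ List.mem_map_of_mem hd)
    rw [last_or_zero_snoc]
    simp [hne]

-- the whole fold: A's loop from mk (ddScan pref) equals mk (ddScan (pref ++ keyed df))
theorem dd_fold (df : List (Int × Int)) (pref : List (String × Int)) :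
    df.foldl (fun d p =>
        let k := PySem.Int.toStr p.1 ++ "일"
        if d.keys.contains k then d.insert k p.2 else d) (PySem.Dict.mk (ddScan pref))
      = PySem.Dict.mk (ddScan (pref ++ df.map (fun p => (PySem.Int.toStr p.1 ++ "일", p.2)))) := by
  induction df generalizing pref with
  | nil => simp
  | cons p tl ih =>
    simp only [List.foldl_cons]
    rw [dd_step pref (PySem.Int.toStr p.1 ++ "일") p.2, ih]
    simp

-- ===== VERDICT (by name: the statement is the Claim_ definition above) =====
theorem dd_count_spec : Claim_equal_dd_count := by
  intro df_dd _
  show dd_count df_dd = dd_count_alt df_dd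
  unfold dd_count dd_count_alt
  rw [ddTemplate_eq_scan_nil, dd_fold]
  rfl
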